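-- pv_equiv track=rewrite | github.com/tigantic/physics-os | tests/test_parallel.py | decompose_domain_2d
-- ===== SOURCE A (Python) =====
-- from typing import Callable, Dict, List, Optional, Tuple
--
-- def decompose_domain_1d(
--     n: int,
--     num_parts: int,
-- ) -> List[Tuple[int, int]]:
--     """Decompose 1D domain into parts."""
--     chunk_size = n // num_parts
--     remainder = n % num_parts
--
--     parts = []
--     start = 0
--     for i in range(num_parts):
--         size = chunk_size + (1 if i < remainder else 0)
--         parts.append((start, start + size))
--         start += size
--
--     return parts
--
-- def decompose_domain_2d(
--     nx: int,
--     ny: int,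
--     px: int,
--     py: int,
-- ) -> List[Tuple[int, int, int, int]]:
--     """Decompose 2D domain into grid of parts."""
--     x_parts = decompose_domain_1d(nx, px)
--     y_parts = decompose_domain_1d(ny, py)
--
--     domains = []
--     for i, (x0, x1) in enumerate(x_parts):
--         for j, (y0, y1) in enumerate(y_parts):
--             domains.append((x0, x1, y0, y1))
--
--     return domains
-- ===== SOURCE B (Python) =====
-- def decompose_domain_2d(nx, ny, px, py):
--     """Decompose 2D domain into grid of parts (closed-form boundaries)."""
--     cx, rx = divmod(nx, px)
--     cy, ry = divmod(ny, py)
--     x_bounds = [(i * cx + min(i, rx), (i + 1) * cx + min(i + 1, rx)) for i in range(px)]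
--     y_bounds = [(j * cy + min(j, ry), (j + 1) * cy + min(j + 1, ry)) for j in range(py)]
--     return [(x0, x1, y0, y1) for x0, x1 in x_bounds for y0, y1 in y_bounds]
-- ===== Notes on version B (the rewrite author's own statement) =====
-- stated objective: simpler
-- what changed: Replaced the running-accumulator decompose_domain_1d helper with closed-form per-index boundary formulas (start = i*chunk + min(i, rem)) computed in comprehensions, eliminating the helper function and both running accumulators.
import Mathlib
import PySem

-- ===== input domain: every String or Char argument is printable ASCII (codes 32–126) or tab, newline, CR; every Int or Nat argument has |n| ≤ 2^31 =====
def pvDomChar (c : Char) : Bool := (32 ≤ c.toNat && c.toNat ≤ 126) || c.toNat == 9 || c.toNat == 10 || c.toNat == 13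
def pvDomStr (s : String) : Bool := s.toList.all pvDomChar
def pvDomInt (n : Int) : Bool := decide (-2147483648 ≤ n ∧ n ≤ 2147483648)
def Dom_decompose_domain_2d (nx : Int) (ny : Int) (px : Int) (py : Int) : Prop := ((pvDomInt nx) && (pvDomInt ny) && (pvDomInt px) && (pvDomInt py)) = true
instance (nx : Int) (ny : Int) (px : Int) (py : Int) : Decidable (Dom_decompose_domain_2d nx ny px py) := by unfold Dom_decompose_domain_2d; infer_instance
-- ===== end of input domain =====

-- B replaces A's running-accumulator 1D decomposition helper by closed-form per-index
-- boundary formulas in a single comprehension (objective: simpler).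

-- ===== PORT A =====
-- list(enumerate(xs, s)) exactly (= PySem.List.enumerate, see pyEnum_eq below); written via
-- zipIdx so the interpreter evaluates it without deep recursion on long lists
def pyEnum {a : Type} (xs : List a) (s : Int) : List (Int × a) :=
  xs.zipIdx.map (fun p => (s + (p.2 : Int), p.1))

def decompose_domain_1d (n : Int) (num_parts : Int) : List (Int × Int) :=
  let chunk_size := PySem.Int.floordiv n num_parts
  let remainder := PySem.Int.mod n num_parts
  let res := (PySem.List.pyRange 0 num_parts 1).foldl
    (fun (st : Array (Int × Int) × Int) i =>
      let size := chunk_size + (if i < remainder then (1:Int) else 0)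
      (st.1.push (st.2, st.2 + size), st.2 + size)) (#[], 0)
  res.1.toList

def decompose_domain_2d (nx : Int) (ny : Int) (px : Int) (py : Int) : List (Int × Int × Int × Int) :=
  let x_parts := decompose_domain_1d nx px
  let y_parts := decompose_domain_1d ny py
  ((pyEnum x_parts 0).foldl
    (fun doms ip =>
      (pyEnum y_parts 0).foldl
        (fun (doms2 : Array (Int × Int × Int × Int)) jp =>
          doms2.push (ip.2.1, ip.2.2, jp.2.1, jp.2.2)) doms) #[]).toList

-- ===== PORT B =====
def decompose_domain_2d_alt (nx : Int) (ny : Int) (px : Int) (py : Int) : List (Int × Int × Int × Int) :=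
  let cx := PySem.Int.floordiv nx px
  let rx := PySem.Int.mod nx px
  let cy := PySem.Int.floordiv ny py
  let ry := PySem.Int.mod ny py
  let x_bounds := (PySem.List.pyRange 0 px 1).map
    (fun i => (i * cx + min i rx, (i + 1) * cx + min (i + 1) rx))
  let y_bounds := (PySem.List.pyRange 0 py 1).map
    (fun j => (j * cy + min j ry, (j + 1) * cy + min (j + 1) ry))
  x_bounds.flatMap (fun q => y_bounds.map (fun w => (q.1, q.2, w.1, w.2)))

-- ===== PRECONDITION & SPEC =====
-- A divides by px and py (ZeroDivisionError when either is 0); Pre_ excludes exactly those inputs.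
def Pre_decompose_domain_2d (nx : Int) (ny : Int) (px : Int) (py : Int) : Prop := px ≠ 0 ∧ py ≠ 0
instance (nx : Int) (ny : Int) (px : Int) (py : Int) : Decidable (Pre_decompose_domain_2d nx ny px py) := by unfold Pre_decompose_domain_2d; infer_instance
def pvWitness_decompose_domain_2d : Int × Int × Int × Int := (10, 7, 3, 2)

def Spec_decompose_domain_2d (nx : Int) (ny : Int) (px : Int) (py : Int) (out : List (Int × Int × Int × Int)) : Prop := out = decompose_domain_2d_alt nx ny px py
instance (nx : Int) (ny : Int) (px : Int) (py : Int) (out : List (Int × Int × Int × Int)) : Decidable (Spec_decompose_domain_2d nx ny px py out) := by unfold Spec_decompose_domain_2d; infer_instance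

-- ===== CLAIM (what is proved, stated in full; the proofs are below) =====
def Claim_equal_decompose_domain_2d : Prop := ∀ (nx : Int) (ny : Int) (px : Int) (py : Int), Dom_decompose_domain_2d nx ny px py → Pre_decompose_domain_2d nx ny px py → Spec_decompose_domain_2d nx ny px py (decompose_domain_2d nx ny px py)

-- ===== LEMMAS AND PROOFS =====

-- closed-form boundary of part i (proof abbreviation)
def pvBound (i c r : Int) : Int := i * c + min i r

lemma pyEnum_eq {a : Type} (xs : List a) (s : Int) : pyEnum xs s = PySem.List.enumerate xs s := by
  rw [PySem.List.enumerate_eq_zipIdx_map, pyEnum]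

-- A's accumulated start after m steps is the closed-form boundary pvBound m
lemma fold1d (c r : Int) (hr : 0 ≤ r) (m : Nat) :
    ((PySem.List.pyRange 0 (m : Int) 1).foldl
      (fun (st : Array (Int × Int) × Int) i =>
        (st.1.push (st.2, st.2 + (c + (if i < r then (1:Int) else 0))),
         st.2 + (c + (if i < r then (1:Int) else 0)))) (#[], 0))
    = (((PySem.List.pyRange 0 (m : Int) 1).map
          (fun i => (pvBound i c r, pvBound (i + 1) c r))).toArray,
       pvBound (m : Int) c r) := by
  induction m with
  | zero => simp [PySem.List.pyRange_one_eq_nil, pvBound]; omega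
  | succ k ih =>
    have h : PySem.List.pyRange 0 ((k + 1 : Nat) : Int) 1
        = PySem.List.pyRange 0 (k : Int) 1 ++ [(k : Int)] := by
      have h2 := PySem.List.pyRange_one_succ_right (a := 0) (b := (k : Int)) (by positivity)
      rw [show ((k + 1 : Nat) : Int) = (k : Int) + 1 by push_cast; ring, h2]
    rw [h, List.foldl_append, List.map_append, ih]
    simp only [List.foldl_cons, List.foldl_nil, List.push_toArray]
    have e1 : pvBound (↑k) c r + (c + if (k : Int) < r then (1:Int) else 0)
        = pvBound ((k : Int) + 1) c r := by
      simp only [pvBound]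
      rw [add_mul, one_mul]
      rcases lt_or_ge (k : Int) r with hk | hk
      · rw [if_pos hk]; omega
      · rw [if_neg (by omega)]; omega
    rw [e1, show ((k + 1 : Nat) : Int) = (k : Int) + 1 by push_cast; ring]
    simp

lemma oneD_eq (n p : Int) :
    decompose_domain_1d n p
    = (PySem.List.pyRange 0 p 1).map
        (fun i => (pvBound i (PySem.Int.floordiv n p) (PySem.Int.mod n p),
                   pvBound (i + 1) (PySem.Int.floordiv n p) (PySem.Int.mod n p))) := by
  by_cases hp : p ≤ 0
  · simp [decompose_domain_1d, PySem.List.pyRange_one_eq_nil hp]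
  · have hr : 0 ≤ PySem.Int.mod n p := by
      have h2 := PySem.Int.mod_eq_emod_of_pos (a := n) (b := p) (by omega)
      rw [h2]; exact Int.emod_nonneg n (by omega)
    obtain ⟨m, rfl⟩ : ∃ m : Nat, p = (m : Int) := ⟨p.toNat, by omega⟩
    simp only [decompose_domain_1d]
    rw [fold1d _ _ hr, List.toList_toArray]

lemma inner_fold (ys : List (Int × Int)) (q : Int × Int)
    (acc : Array (Int × Int × Int × Int)) (s : Int) :
    ((PySem.List.enumerate ys s).foldl
      (fun (d2 : Array (Int × Int × Int × Int)) jp =>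
        d2.push (q.1, q.2, jp.2.1, jp.2.2)) acc).toList
    = acc.toList ++ ys.map (fun w => (q.1, q.2, w.1, w.2)) := by
  induction ys generalizing s acc with
  | nil => simp [PySem.List.enumerate_nil]
  | cons y ys ih =>
    rw [PySem.List.enumerate_cons, List.foldl_cons, ih, Array.toList_push]
    simp

lemma twoD_fold (ys : List (Int × Int)) (xs : List (Int × Int)) :
    ∀ (s : Int) (acc : Array (Int × Int × Int × Int)),
    ((PySem.List.enumerate xs s).foldl
      (fun doms ip =>
        (PySem.List.enumerate ys 0).foldl
          (fun (d2 : Array (Int × Int × Int × Int)) jp =>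
            d2.push (ip.2.1, ip.2.2, jp.2.1, jp.2.2)) doms) acc).toList
    = acc.toList ++ xs.flatMap (fun q => ys.map (fun w => (q.1, q.2, w.1, w.2))) := by
  induction xs with
  | nil => intro s acc; simp [PySem.List.enumerate_nil]
  | cons x xs ih =>
    intro s acc
    rw [PySem.List.enumerate_cons, List.foldl_cons, ih]
    rw [inner_fold]
    simp

-- ===== VERDICT (by name: the statement is the Claim_ definition above) =====
theorem decompose_domain_2d_spec : Claim_equal_decompose_domain_2d := by
  intro nx ny px py _ _
  unfold Spec_decompose_domain_2d decompose_domain_2d decompose_domain_2d_alt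
  simp only [pyEnum_eq]
  rw [oneD_eq nx px, oneD_eq ny py, twoD_fold]
  simp only [pvBound, List.nil_append]
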